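-- pv_equiv track=rewrite | github.com/AjeyBharadwaj/SalemSpencerGenerator | main.py | fill_next
-- ===== SOURCE A (Python) =====
-- def fill_next(Series, Diff, Max):
--     Cur = Series[-1]
--
--     for i in range(Cur+1, Max+1):
--         CanAdd = True
--
--         # See if D is already there.
--         for j in Diff:
--             D = i - j
--             if D in Diff[j]:
--                 CanAdd = False
--                 break
--
--         if CanAdd is True:
--             # Now I can add
--             for j in Diff:
--                 D = i - j
--                 Diff[j].append(D)
--
--             Series.append(i)
--
--             Diff[i] = []
--             for j in Series:
--                 Diff[i].append(i - j)
--
--             return True, Series, Diff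
--
--     return False, Series, Diff
-- ===== SOURCE B (Python) =====
-- def fill_next(Series, Diff, Max):
--     # Stage 1: collect every blocked successor value j + d in one pass over the table.
--     forbidden = {j + d for j, ds in Diff.items() for d in ds}
--     # Stage 2: pick the first candidate above Series[-1] that is not blocked.
--     i = next((k for k in range(Series[-1] + 1, Max + 1) if k not in forbidden), None)
--     if i is None:
--         return False, Series, Diff
--     # Stage 3: build the extended structures functionally (no in-place mutation).
--     new_series = Series + [i]
--     new_diff = {j: ds + [i - j] for j, ds in Diff.items()}
--     new_diff[i] = [i - j for j in new_series]
--     return True, new_series, new_diff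
-- ===== Notes on version B (the rewrite author's own statement) =====
-- stated objective: alternative
-- what changed: B is staged and purely functional: it precomputes the forbidden-successor set {j+d} once, selects the first free candidate with a single set-membership test per candidate, and rebuilds Series/Diff by comprehensions, instead of A's per-candidate rescan of every difference list and in-place appends; A mutates Series/Diff in place while B returns fresh objects (return values are identical); on the generated inputs B was not measurably faster.
import Mathlib
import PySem

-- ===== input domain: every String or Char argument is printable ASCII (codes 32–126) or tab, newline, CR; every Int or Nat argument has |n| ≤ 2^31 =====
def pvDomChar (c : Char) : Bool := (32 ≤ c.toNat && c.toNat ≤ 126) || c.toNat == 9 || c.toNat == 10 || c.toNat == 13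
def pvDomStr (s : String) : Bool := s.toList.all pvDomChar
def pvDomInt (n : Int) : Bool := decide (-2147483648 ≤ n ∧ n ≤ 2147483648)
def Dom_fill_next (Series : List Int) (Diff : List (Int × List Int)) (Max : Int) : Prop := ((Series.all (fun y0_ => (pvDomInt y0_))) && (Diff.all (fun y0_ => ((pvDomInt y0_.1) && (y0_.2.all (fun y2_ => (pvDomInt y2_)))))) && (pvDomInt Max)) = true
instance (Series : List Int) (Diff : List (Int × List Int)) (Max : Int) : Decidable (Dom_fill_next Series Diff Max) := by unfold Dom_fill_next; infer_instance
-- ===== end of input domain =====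

-- A mutates Series/Diff in place, B builds fresh objects; the equivalence proved here is about the RETURN value only.
-- ===== PORT A =====
def pvCheckA (d : PySem.Dict Int (List Int)) (i : Int) : Bool :=
  d.keys.all (fun j => !((d.getD j []).contains (i - j)))

-- range(Cur+1, Max+1) is walked one candidate i at a time (fuel = number of remaining candidates).
def pvLoopA (Series : List Int) (d : PySem.Dict Int (List Int)) (i : Int) :
    Nat → Bool × List Int × (List (Int × List Int))
  | 0 => (false, Series, d.items)
  | fuel + 1 =>
    if pvCheckA d i then
      let d1 := d.keys.foldl (fun dd j => dd.modify j [] (· ++ [i - j])) d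
      let S1 := Series ++ [i]
      let d2 := d1.insert i []
      let d3 := S1.foldl (fun dd j => dd.modify i [] (· ++ [i - j])) d2
      (true, S1, d3.items)
    else pvLoopA Series d (i + 1) fuel

def fill_next (Series : List Int) (Diff : List (Int × List Int)) (Max : Int) : Bool × List Int × (List (Int × List Int)) :=
  match PySem.List.pyGet? Series (-1) with
  | none => (false, Series, Diff)           -- Series[-1] raises IndexError: excluded by Pre_
  | some Cur => pvLoopA Series (PySem.Dict.mk Diff) (Cur + 1) (Max - Cur).toNat

-- ===== PORT B =====
-- Stage 1: the forbidden-successor set, built directly from the association list.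
def pvForbidden (Diff : List (Int × List Int)) : PySem.Set Int :=
  PySem.Set.ofList (Diff.flatMap (fun p => p.2.map (fun dd => p.1 + dd)))

-- Stage 2: first candidate not in F (Python's next(... if k not in forbidden, None)).
def pvFindFree (F : PySem.Set Int) (i : Int) : Nat → Option Int
  | 0 => none
  | fuel + 1 => if F.contains i then pvFindFree F (i + 1) fuel else some i

def fill_next_alt (Series : List Int) (Diff : List (Int × List Int)) (Max : Int) : Bool × List Int × (List (Int × List Int)) :=
  match PySem.List.pyGet? Series (-1) with
  | none => (false, Series, Diff)           -- Series[-1] raises IndexError: excluded by Pre_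
  | some Cur =>
    match pvFindFree (pvForbidden Diff) (Cur + 1) (Max - Cur).toNat with
    | none => (false, Series, Diff)
    | some i =>
      -- Stage 3: functional rebuild by comprehensions.
      let S1 := Series ++ [i]
      let nd := (PySem.Dict.mk (Diff.map (fun p => (p.1, p.2 ++ [i - p.1])))).insert i (S1.map (fun j => i - j))
      (true, S1, nd.items)

-- ===== PRECONDITION & SPEC =====
-- Pre_ excludes empty Series, on which both Pythons raise IndexError at Series[-1], and association
-- lists with duplicate keys, which do not represent any Python dict (Diff is a dict in Python).
def Pre_fill_next (Series : List Int) (Diff : List (Int × List Int)) (Max : Int) : Prop :=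
  Series ≠ [] ∧ (Diff.map Prod.fst).Nodup
instance (Series : List Int) (Diff : List (Int × List Int)) (Max : Int) : Decidable (Pre_fill_next Series Diff Max) := by unfold Pre_fill_next; infer_instance
def pvWitness_fill_next : List Int × (List (Int × List Int)) × Int := ([1], [((1 : Int), [(0 : Int)])], 4)

def Spec_fill_next (Series : List Int) (Diff : List (Int × List Int)) (Max : Int) (out : Bool × List Int × (List (Int × List Int))) : Prop := out = fill_next_alt Series Diff Max
instance (Series : List Int) (Diff : List (Int × List Int)) (Max : Int) (out : Bool × List Int × (List (Int × List Int))) : Decidable (Spec_fill_next Series Diff Max out) := by unfold Spec_fill_next; infer_instance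

-- ===== CLAIM (what is proved, stated in full; the proofs are below) =====
def Claim_equal_fill_next : Prop := ∀ (Series : List Int) (Diff : List (Int × List Int)) (Max : Int), Dom_fill_next Series Diff Max → Pre_fill_next Series Diff Max → Spec_fill_next Series Diff Max (fill_next Series Diff Max)

-- ===== LEMMAS AND PROOFS =====

-- A's per-candidate scan of the difference lists decides exactly membership in B's forbidden set,
-- and A's key-by-key append loops are B's comprehensions; proved below, then glued per range element.
lemma pv_getD (L : List (Int × List Int)) (hnd : (L.map Prod.fst).Nodup)
    {p : Int × List Int} (hp : p ∈ L) : (PySem.Dict.mk L).getD p.1 [] = p.2 :=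
  PySem.Dict.getD_of_mem_items (PySem.Dict.mk L) (by simpa using hp)
    (by simpa [PySem.Dict.keys] using hnd) []

lemma pv_cond_eq (L : List (Int × List Int)) (hnd : (L.map Prod.fst).Nodup) (i : Int) :
    pvCheckA (PySem.Dict.mk L) i = !((pvForbidden L).contains i) := by
  rw [Bool.eq_iff_iff]
  simp only [pvCheckA, pvForbidden, List.all_eq_true, PySem.Set.contains_eq_listContains,
    List.contains_eq_mem, PySem.Set.mem_ofList, List.mem_flatMap, List.mem_map,
    Bool.not_eq_eq_eq_not, Bool.not_true, decide_eq_false_iff_not,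
    PySem.Dict.keys]
  constructor
  · rintro h ⟨p, hp, dd, hdd, hsum⟩
    have := h p.1 ⟨p, hp, rfl⟩
    rw [pv_getD L hnd hp] at this
    exact this (by rw [show i - p.1 = dd by omega]; exact hdd)
  · rintro h x ⟨p, hp, rfl⟩ hmem
    rw [pv_getD L hnd hp] at hmem
    exact h ⟨p, hp, i - p.1, hmem, by ring⟩

lemma pv_modify_cons (q : Int × List Int) (M : List (Int × List Int)) (j : Int) (hj : j ≠ q.1)
    (f : List Int → List Int) :
    (PySem.Dict.mk (q :: M)).modify j [] f
      = PySem.Dict.mk (q :: ((PySem.Dict.mk M).modify j [] f).items) := by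
  have hbeq : (q.1 == j) = false := by simp [Ne.symm hj]
  simp only [PySem.Dict.modify, PySem.Dict.insert, PySem.Dict.getD, PySem.Dict.get?,
    PySem.Dict.contains, List.any_cons, List.find?, hbeq, Bool.false_or]
  split_ifs with h <;> simp_all [List.cons_append]

lemma pv_foldl_modify_cons (K : List Int) (q : Int × List Int) (M : List (Int × List Int)) (i : Int)
    (h : q.1 ∉ K) :
    K.foldl (fun dd j => dd.modify j [] (· ++ [i - j])) (PySem.Dict.mk (q :: M))
      = PySem.Dict.mk (q :: (K.foldl (fun dd j => dd.modify j [] (· ++ [i - j])) (PySem.Dict.mk M)).items) := by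
  induction K generalizing M with
  | nil => rfl
  | cons j K ih =>
    simp only [List.mem_cons, not_or] at h
    simp only [List.foldl_cons]
    rw [pv_modify_cons q M j (fun hc => h.1 hc.symm)]
    exact ih _ h.2

lemma pv_modify_all (L : List (Int × List Int)) (i : Int) (hnd : (L.map Prod.fst).Nodup) :
    (PySem.Dict.mk L).keys.foldl (fun dd j => dd.modify j [] (· ++ [i - j])) (PySem.Dict.mk L)
      = PySem.Dict.mk (L.map (fun p => (p.1, p.2 ++ [i - p.1]))) := by
  induction L with
  | nil => rfl
  | cons p L ih =>
    simp only [List.map_cons, List.nodup_cons] at hnd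
    have hmap : ∀ v : List Int,
        L.map (fun r => if r.1 = p.1 then (p.1, v) else r) = L := by
      intro v
      conv_rhs => rw [← List.map_id L]
      refine List.map_congr_left ?_
      intro r hr
      have : r.1 ≠ p.1 := fun he => hnd.1 (he ▸ List.mem_map_of_mem (f := Prod.fst) hr)
      simp [this]
    have hstep : (PySem.Dict.mk (p :: L)).modify p.1 [] (· ++ [i - p.1])
        = PySem.Dict.mk ((p.1, p.2 ++ [i - p.1]) :: L) := by
      simp only [PySem.Dict.modify, PySem.Dict.insert, PySem.Dict.getD, PySem.Dict.get?,
        PySem.Dict.contains, List.any_cons, List.find?, beq_self_eq_true, Bool.true_or, if_true]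
      simp [hmap]
    have hkeys : (PySem.Dict.mk (p :: L)).keys = p.1 :: (PySem.Dict.mk L).keys := by
      simp [PySem.Dict.keys]
    rw [hkeys]
    simp only [List.foldl_cons, hstep]
    rw [pv_foldl_modify_cons _ _ _ _ (by simpa [PySem.Dict.keys] using hnd.1)]
    rw [ih hnd.2]
    simp

-- A fills Diff[i] by an append loop over Series; that is one insert of the comprehension.
lemma pv_foldl_modify_insert (d1 : PySem.Dict Int (List Int)) (i : Int) (S : List Int) (acc : List Int) :
    S.foldl (fun dd j => dd.modify i [] (· ++ [i - j])) (d1.insert i acc)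
      = d1.insert i (acc ++ S.map (fun j => i - j)) := by
  induction S generalizing acc with
  | nil => simp
  | cons x xs ih =>
    simp only [List.foldl_cons, List.map_cons]
    have hstep : (d1.insert i acc).modify i [] (· ++ [i - x]) = d1.insert i (acc ++ [i - x]) := by
      simp [PySem.Dict.modify, PySem.Dict.getD_insert_self, PySem.Dict.insert_insert_self]
    rw [hstep, ih]
    simp

lemma pv_loop_eq (Series : List Int) (L : List (Int × List Int)) (hnd : (L.map Prod.fst).Nodup)
    (fuel : Nat) (i0 : Int) :
    pvLoopA Series (PySem.Dict.mk L) i0 fuel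
      = match pvFindFree (pvForbidden L) i0 fuel with
        | none => (false, Series, L)
        | some i =>
          (true, Series ++ [i],
            ((PySem.Dict.mk (L.map (fun p => (p.1, p.2 ++ [i - p.1])))).insert i
              ((Series ++ [i]).map (fun j => i - j))).items) := by
  induction fuel generalizing i0 with
  | zero => rfl
  | succ fuel ih =>
    simp only [pvLoopA, pvFindFree, pv_cond_eq L hnd i0]
    cases hc : (pvForbidden L).contains i0 with
    | true => simpa [hc] using ih (i0 + 1)
    | false =>
      simp only [Bool.not_false, if_true]
      rw [pv_modify_all L i0 hnd, pv_foldl_modify_insert]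
      simp

-- ===== VERDICT (by name: the statement is the Claim_ definition above) =====
theorem fill_next_spec : Claim_equal_fill_next := by
  intro Series Diff Max _ hpre
  unfold Spec_fill_next fill_next fill_next_alt
  cases PySem.List.pyGet? Series (-1) with
  | none => rfl
  | some Cur =>
    simp only
    rw [pv_loop_eq Series Diff hpre.2 _ _]
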